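-- pv_equiv track=rewrite | github.com/mcjon3z/legion | app/scheduler/risk.py | safer_alternative_for_risk_tags
-- ===== SOURCE A (Python) =====
-- from typing import Any, Dict, Iterable, List, Optional, Set
--
-- VALID_RISK_TAGS = {
--     "exploit_execution",
--     "credential_bruteforce",
--     "password_spray",
--     "account_lockout_risk",
--     "service_instability",
--     "network_flooding",
--     "destructive_write",
--     "persistence_action",
--     "lateral_movement",
--     "high_detection_likelihood",
--     "credential_capture_side_effect",
--     "browser_state_change",
--     "data_exfiltration_risk",
-- }
--
-- RISK_FAMILY_SAFE_ALTERNATIVES = (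
--     (
--         {"credential_bruteforce", "password_spray", "account_lockout_risk"},
--         "Prefer credential validation against known accounts or low-impact enumeration first.",
--     ),
--     (
--         {"exploit_execution", "service_instability", "lateral_movement"},
--         "Prefer enumeration, offline validation, or operator-reviewed proof steps before active exploitation.",
--     ),
--     (
--         {"network_flooding", "high_detection_likelihood"},
--         "Prefer narrower scope and rate-limited validation.",
--     ),
--     (
--         {"credential_capture_side_effect"},
--         "Prefer passive checks or operator-reviewed relay testing.",
--     ),
--     (
--         {"destructive_write", "persistence_action", "data_exfiltration_risk"},
--         "Prefer read-only validation and artifact collection.",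
--     ),
--     (
--         {"browser_state_change"},
--         "Prefer read-only screenshoting or a manual browser session.",
--     ),
-- )
--
-- LEGACY_CATEGORY_ALIASES = {
--     "destructive_write_actions": "destructive_write",
-- }
--
-- def _normalize_text(value: Any) -> str:
--     return str(value or "").strip().lower()
--
-- def normalize_risk_tags(values: Optional[Iterable[Any]]) -> List[str]:
--     normalized = []
--     seen: Set[str] = set()
--     for item in list(values or []):
--         tag = LEGACY_CATEGORY_ALIASES.get(_normalize_text(item), _normalize_text(item))
--         if not tag or tag not in VALID_RISK_TAGS or tag in seen:
--             continue
--         seen.add(tag)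
--         normalized.append(tag)
--     return normalized
--
-- def safer_alternative_for_risk_tags(tags: Optional[Iterable[Any]]) -> str:
--     tag_set = set(normalize_risk_tags(tags))
--     if not tag_set:
--         return ""
--     for family_tags, message in RISK_FAMILY_SAFE_ALTERNATIVES:
--         if family_tags & tag_set:
--             return message
--     return "Prefer lower-impact validation before escalating to this action."
-- ===== SOURCE B (Python) =====
-- # B: one pass over the tags with a flat tag -> (family_index, message) dict,
-- # tracking the minimum family index seen, instead of normalizing into a list
-- # and then scanning the six family sets in declaration order.
--
-- _SAFE_ALT_BY_TAG = {
--     "credential_bruteforce": (0, "Prefer credential validation against known accounts or low-impact enumeration first."),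
--     "password_spray": (0, "Prefer credential validation against known accounts or low-impact enumeration first."),
--     "account_lockout_risk": (0, "Prefer credential validation against known accounts or low-impact enumeration first."),
--     "exploit_execution": (1, "Prefer enumeration, offline validation, or operator-reviewed proof steps before active exploitation."),
--     "service_instability": (1, "Prefer enumeration, offline validation, or operator-reviewed proof steps before active exploitation."),
--     "lateral_movement": (1, "Prefer enumeration, offline validation, or operator-reviewed proof steps before active exploitation."),
--     "network_flooding": (2, "Prefer narrower scope and rate-limited validation."),
--     "high_detection_likelihood": (2, "Prefer narrower scope and rate-limited validation."),
--     "credential_capture_side_effect": (3, "Prefer passive checks or operator-reviewed relay testing."),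
--     "destructive_write": (4, "Prefer read-only validation and artifact collection."),
--     "persistence_action": (4, "Prefer read-only validation and artifact collection."),
--     "data_exfiltration_risk": (4, "Prefer read-only validation and artifact collection."),
--     "browser_state_change": (5, "Prefer read-only screenshoting or a manual browser session."),
-- }
--
-- _ALIASES = {"destructive_write_actions": "destructive_write"}
--
--
-- def _norm(value):
--     return str(value or "").strip().lower()
--
--
-- def safer_alternative_for_risk_tags(tags):
--     best = None
--     seen = set()
--     for item in (tags or []):
--         t = _norm(item)
--         t = _ALIASES.get(t, t)
--         if t in seen:
--             continue
--         seen.add(t)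
--         hit = _SAFE_ALT_BY_TAG.get(t)
--         if hit is not None and (best is None or hit[0] < best[0]):
--             best = hit
--     return best[1] if best is not None else ""
-- ===== Notes on version B (the rewrite author's own statement) =====
-- stated objective: simpler
-- what changed: Replaced normalize-into-a-list plus an ordered scan of the six family sets by a single pass over the tags that looks each normalized tag up in a flat tag->(family_index, message) dict and keeps the minimum family index; the family-set scan and the intermediate normalized list disappear.
import Mathlib
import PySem

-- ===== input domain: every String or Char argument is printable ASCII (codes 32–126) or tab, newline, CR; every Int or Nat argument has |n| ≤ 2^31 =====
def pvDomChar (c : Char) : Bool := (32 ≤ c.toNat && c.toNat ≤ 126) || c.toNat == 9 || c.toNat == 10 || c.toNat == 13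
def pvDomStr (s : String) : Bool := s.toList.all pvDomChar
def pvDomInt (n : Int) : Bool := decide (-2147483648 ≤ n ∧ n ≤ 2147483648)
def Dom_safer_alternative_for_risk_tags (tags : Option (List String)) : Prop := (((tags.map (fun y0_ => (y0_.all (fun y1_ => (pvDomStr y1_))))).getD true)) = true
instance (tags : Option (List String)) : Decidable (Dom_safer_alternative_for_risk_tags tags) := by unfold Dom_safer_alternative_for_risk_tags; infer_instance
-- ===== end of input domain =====

-- B replaces A's normalize-into-a-list pass plus an ordered scan of the six family sets
-- by a single pass over the tags with a flat tag -> (family_index, message) dict, keeping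
-- the minimum family index seen (simpler: one loop, no intermediate list, no family scan).

-- ===== PORT A =====
def pvMsg0 : String := "Prefer credential validation against known accounts or low-impact enumeration first."
def pvMsg1 : String := "Prefer enumeration, offline validation, or operator-reviewed proof steps before active exploitation."
def pvMsg2 : String := "Prefer narrower scope and rate-limited validation."
def pvMsg3 : String := "Prefer passive checks or operator-reviewed relay testing."
def pvMsg4 : String := "Prefer read-only validation and artifact collection."
def pvMsg5 : String := "Prefer read-only screenshoting or a manual browser session."

def pvValidRiskTags : PySem.Set String :=
  ["exploit_execution", "credential_bruteforce", "password_spray", "account_lockout_risk",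
   "service_instability", "network_flooding", "destructive_write", "persistence_action",
   "lateral_movement", "high_detection_likelihood", "credential_capture_side_effect",
   "browser_state_change", "data_exfiltration_risk"]

def pvFam0 : PySem.Set String := ["credential_bruteforce", "password_spray", "account_lockout_risk"]
def pvFam1 : PySem.Set String := ["exploit_execution", "service_instability", "lateral_movement"]
def pvFam2 : PySem.Set String := ["network_flooding", "high_detection_likelihood"]
def pvFam3 : PySem.Set String := ["credential_capture_side_effect"]
def pvFam4 : PySem.Set String := ["destructive_write", "persistence_action", "data_exfiltration_risk"]
def pvFam5 : PySem.Set String := ["browser_state_change"]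

def pvRiskFamilies : List (PySem.Set String × String) :=
  [(pvFam0, pvMsg0), (pvFam1, pvMsg1), (pvFam2, pvMsg2),
   (pvFam3, pvMsg3), (pvFam4, pvMsg4), (pvFam5, pvMsg5)]

def pvLegacyAliases : PySem.Dict String String :=
  PySem.Dict.ofList [("destructive_write_actions", "destructive_write")]

-- str(value or "").strip().lower(): on a string argument `value or ""` is `value` unless empty
def pvNormalizeText (value : String) : String :=
  PySem.Str.lower (PySem.Str.strip (if value == "" then "" else value))

-- the loop body of normalize_risk_tags
def pvStepA (st : List String × PySem.Set String) (item : String) : List String × PySem.Set String :=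
  let tag := PySem.Dict.getD pvLegacyAliases (pvNormalizeText item) (pvNormalizeText item)
  if (tag == "") || !(PySem.Set.contains pvValidRiskTags tag) || PySem.Set.contains st.2 tag then st
  else (st.1 ++ [tag], PySem.Set.add st.2 tag)

def normalize_risk_tags (values : Option (List String)) : List String :=
  ((values.getD []).foldl pvStepA ([], PySem.Set.empty)).1

-- the `for family_tags, message in RISK_FAMILY_SAFE_ALTERNATIVES` loop; `if family_tags & tag_set:`
-- is truthiness of the intersection, i.e. the intersection is non-empty
def pvScanFamilies : List (PySem.Set String × String) → PySem.Set String → String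
  | [], _ => "Prefer lower-impact validation before escalating to this action."
  | (family_tags, message) :: rest, tag_set =>
      if PySem.Set.inter family_tags tag_set ≠ [] then message else pvScanFamilies rest tag_set

def safer_alternative_for_risk_tags (tags : Option (List String)) : String :=
  let tag_set : PySem.Set String := PySem.Set.ofList (normalize_risk_tags tags)
  if tag_set = [] then "" else pvScanFamilies pvRiskFamilies tag_set

-- ===== PORT B =====
def pvSafeAltByTag : PySem.Dict String (Int × String) := PySem.Dict.ofList
  [ ("credential_bruteforce", (0, pvMsg0)), ("password_spray", (0, pvMsg0)), ("account_lockout_risk", (0, pvMsg0)),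
    ("exploit_execution", (1, pvMsg1)), ("service_instability", (1, pvMsg1)), ("lateral_movement", (1, pvMsg1)),
    ("network_flooding", (2, pvMsg2)), ("high_detection_likelihood", (2, pvMsg2)),
    ("credential_capture_side_effect", (3, pvMsg3)),
    ("destructive_write", (4, pvMsg4)), ("persistence_action", (4, pvMsg4)), ("data_exfiltration_risk", (4, pvMsg4)),
    ("browser_state_change", (5, pvMsg5)) ]

-- the body of B's single loop: normalize, alias, dedup via `seen`, keep the minimum family index
-- (Source B's _norm / _ALIASES are the same helper and constant as A's: ported once, above)
def pvStepB (st : PySem.Set String × Option (Int × String)) (item : String) :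
    PySem.Set String × Option (Int × String) :=
  let t := PySem.Dict.getD pvLegacyAliases (pvNormalizeText item) (pvNormalizeText item)
  if PySem.Set.contains st.1 t then st
  else
    let seen := PySem.Set.add st.1 t
    match pvSafeAltByTag.get? t with
    | none => (seen, st.2)
    | some hit =>
        (seen, match st.2 with
               | none => some hit
               | some best => if hit.1 < best.1 then some hit else some best)

def safer_alternative_for_risk_tags_alt (tags : Option (List String)) : String :=
  match ((tags.getD []).foldl pvStepB (PySem.Set.empty, none)).2 with
  | none => ""
  | some best => best.2

-- ===== PRECONDITION & SPEC =====
def Spec_safer_alternative_for_risk_tags (tags : Option (List String)) (out : String) : Prop := out = safer_alternative_for_risk_tags_alt tags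
instance (tags : Option (List String)) (out : String) : Decidable (Spec_safer_alternative_for_risk_tags tags out) := by unfold Spec_safer_alternative_for_risk_tags; infer_instance

-- ===== CLAIM (what is proved, stated in full; the proofs are below) =====
def Claim_equal_safer_alternative_for_risk_tags : Prop := ∀ (tags : Option (List String)), Dom_safer_alternative_for_risk_tags tags → Spec_safer_alternative_for_risk_tags tags (safer_alternative_for_risk_tags tags)

-- ===== LEMMAS AND PROOFS =====

-- proof-side abbreviation for B's min-update on a hit
def pvCombine (bb : Option (Int × String)) (h : Int × String) : Option (Int × String) :=
  match bb with
  | none => some h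
  | some best => if h.1 < best.1 then some h else some best

def pvMinStep (bb : Option (Int × String)) (t : String) : Option (Int × String) :=
  match pvSafeAltByTag.get? t with
  | none => bb
  | some h => pvCombine bb h

-- the minimum-family hit contributed by a list of (already normalized) tags
def pvMinFam (l : List String) : Option (Int × String) := l.foldl pvMinStep none

-- "some tag of l hits h in the flat dict"
def pvOccH (l : List String) (h : Int × String) : Prop := ∃ t ∈ l, pvSafeAltByTag.get? t = some h

-- the keys of B's flat dict, as a literal list
lemma pvKeys_eq : pvSafeAltByTag.keys =
    ["credential_bruteforce", "password_spray", "account_lockout_risk",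
     "exploit_execution", "service_instability", "lateral_movement",
     "network_flooding", "high_detection_likelihood", "credential_capture_side_effect",
     "destructive_write", "persistence_action", "data_exfiltration_risk",
     "browser_state_change"] := by decide

-- membership in VALID_RISK_TAGS coincides with presence in B's flat dict
lemma pvValid_eq_isSome (t : String) :
    PySem.Set.contains pvValidRiskTags t = (pvSafeAltByTag.get? t).isSome := by
  by_cases hk : t ∈ pvSafeAltByTag.keys
  · rw [pvKeys_eq] at hk
    fin_cases hk <;> decide
  · rw [(PySem.Dict.get?_eq_none_iff_not_mem_keys _ _).mpr hk]
    apply Bool.eq_false_iff.mpr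
    intro hc
    have hc' := (PySem.Set.contains_iff _ _).mp hc
    simp only [pvValidRiskTags, List.mem_cons, List.not_mem_nil, or_false] at hc'
    rcases hc' with rfl|rfl|rfl|rfl|rfl|rfl|rfl|rfl|rfl|rfl|rfl|rfl|rfl <;> exact hk (by decide)

-- the family table indexed by Fin 6
def pvFamAt : Fin 6 → PySem.Set String × String
  | ⟨0, _⟩ => (pvFam0, pvMsg0)
  | ⟨1, _⟩ => (pvFam1, pvMsg1)
  | ⟨2, _⟩ => (pvFam2, pvMsg2)
  | ⟨3, _⟩ => (pvFam3, pvMsg3)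
  | ⟨4, _⟩ => (pvFam4, pvMsg4)
  | ⟨5, _⟩ => (pvFam5, pvMsg5)

lemma pvRiskFamilies_length : pvRiskFamilies.length = 6 := rfl

lemma pvFamAt_eq (i : Fin 6) (hi : i.1 < pvRiskFamilies.length) :
    pvRiskFamilies[i.1]'hi = pvFamAt i := by
  fin_cases i <;> rfl

-- every hit of the flat dict is (j, message of family j) for a tag of family j
lemma pvGet?_cases (t : String) (h : Int × String) (hg : pvSafeAltByTag.get? t = some h) :
    ∃ j : Fin 6, h = ((j.1 : Int), (pvFamAt j).2) ∧ t ∈ (pvFamAt j).1 := by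
  by_cases hk : t ∈ pvSafeAltByTag.keys
  · rw [pvKeys_eq] at hk
    fin_cases hk
    · rw [(by decide : pvSafeAltByTag.get? "credential_bruteforce" = some ((0 : Int), pvMsg0))] at hg
      obtain rfl := Option.some.inj hg
      exact ⟨⟨0, by omega⟩, by decide, by decide⟩
    · rw [(by decide : pvSafeAltByTag.get? "password_spray" = some ((0 : Int), pvMsg0))] at hg
      obtain rfl := Option.some.inj hg
      exact ⟨⟨0, by omega⟩, by decide, by decide⟩
    · rw [(by decide : pvSafeAltByTag.get? "account_lockout_risk" = some ((0 : Int), pvMsg0))] at hg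
      obtain rfl := Option.some.inj hg
      exact ⟨⟨0, by omega⟩, by decide, by decide⟩
    · rw [(by decide : pvSafeAltByTag.get? "exploit_execution" = some ((1 : Int), pvMsg1))] at hg
      obtain rfl := Option.some.inj hg
      exact ⟨⟨1, by omega⟩, by decide, by decide⟩
    · rw [(by decide : pvSafeAltByTag.get? "service_instability" = some ((1 : Int), pvMsg1))] at hg
      obtain rfl := Option.some.inj hg
      exact ⟨⟨1, by omega⟩, by decide, by decide⟩
    · rw [(by decide : pvSafeAltByTag.get? "lateral_movement" = some ((1 : Int), pvMsg1))] at hg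
      obtain rfl := Option.some.inj hg
      exact ⟨⟨1, by omega⟩, by decide, by decide⟩
    · rw [(by decide : pvSafeAltByTag.get? "network_flooding" = some ((2 : Int), pvMsg2))] at hg
      obtain rfl := Option.some.inj hg
      exact ⟨⟨2, by omega⟩, by decide, by decide⟩
    · rw [(by decide : pvSafeAltByTag.get? "high_detection_likelihood" = some ((2 : Int), pvMsg2))] at hg
      obtain rfl := Option.some.inj hg
      exact ⟨⟨2, by omega⟩, by decide, by decide⟩
    · rw [(by decide : pvSafeAltByTag.get? "credential_capture_side_effect" = some ((3 : Int), pvMsg3))] at hg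
      obtain rfl := Option.some.inj hg
      exact ⟨⟨3, by omega⟩, by decide, by decide⟩
    · rw [(by decide : pvSafeAltByTag.get? "destructive_write" = some ((4 : Int), pvMsg4))] at hg
      obtain rfl := Option.some.inj hg
      exact ⟨⟨4, by omega⟩, by decide, by decide⟩
    · rw [(by decide : pvSafeAltByTag.get? "persistence_action" = some ((4 : Int), pvMsg4))] at hg
      obtain rfl := Option.some.inj hg
      exact ⟨⟨4, by omega⟩, by decide, by decide⟩
    · rw [(by decide : pvSafeAltByTag.get? "data_exfiltration_risk" = some ((4 : Int), pvMsg4))] at hg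
      obtain rfl := Option.some.inj hg
      exact ⟨⟨4, by omega⟩, by decide, by decide⟩
    · rw [(by decide : pvSafeAltByTag.get? "browser_state_change" = some ((5 : Int), pvMsg5))] at hg
      obtain rfl := Option.some.inj hg
      exact ⟨⟨5, by omega⟩, by decide, by decide⟩
  · rw [(PySem.Dict.get?_eq_none_iff_not_mem_keys _ _).mpr hk] at hg
    cases hg

-- conversely, tags of family j hit exactly (j, message of family j)
lemma pvFam_lookup (i : Fin 6) : ∀ y ∈ (pvFamAt i).1,
    pvSafeAltByTag.get? y = some ((i.1 : Int), (pvFamAt i).2) := by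
  fin_cases i <;> decide

lemma pvCombine_spec (bb : Option (Int × String)) (h : Int × String) :
    ∃ q, pvCombine bb h = some q ∧ q.1 ≤ h.1 ∧ (∀ p, bb = some p → q.1 ≤ p.1) ∧
      (q = h ∨ bb = some q) := by
  cases bb with
  | none => exact ⟨h, rfl, le_refl _, by simp, Or.inl rfl⟩
  | some p =>
    by_cases hlt : h.1 < p.1
    · refine ⟨h, by simp [pvCombine, hlt], le_refl _, ?_, Or.inl rfl⟩
      intro q hq; cases hq; omega
    · refine ⟨p, by simp [pvCombine, hlt], by omega, ?_, Or.inr rfl⟩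
      intro q hq; cases hq; omega

lemma pvMinFam_aux (l : List String) : ∀ (acc : Option (Int × String)),
    (List.foldl pvMinStep acc l = acc ∨ ∃ h, List.foldl pvMinStep acc l = some h ∧ pvOccH l h)
  ∧ (∀ p, acc = some p → ∃ h, List.foldl pvMinStep acc l = some h ∧ h.1 ≤ p.1)
  ∧ (∀ h', pvOccH l h' → ∃ h, List.foldl pvMinStep acc l = some h ∧ h.1 ≤ h'.1) := by
  induction l with
  | nil =>
    intro acc
    refine ⟨Or.inl rfl, fun p hp => ⟨p, by simp [hp], le_refl _⟩, fun h' hocc => ?_⟩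
    obtain ⟨t, ht, _⟩ := hocc
    exact absurd ht (List.not_mem_nil)
  | cons t rest ih =>
    intro acc
    simp only [List.foldl_cons]
    rcases hg : pvSafeAltByTag.get? t with _ | g
    · have hstep : pvMinStep acc t = acc := by simp [pvMinStep, hg]
      rw [hstep]
      obtain ⟨ih1, ih2, ih3⟩ := ih acc
      refine ⟨?_, ih2, ?_⟩
      · rcases ih1 with h | ⟨h, hr, ⟨u, hu, hgu⟩⟩
        · exact Or.inl h
        · exact Or.inr ⟨h, hr, ⟨u, List.mem_cons_of_mem _ hu, hgu⟩⟩
      · intro h' hocc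
        obtain ⟨u, hu, hgu⟩ := hocc
        rcases List.mem_cons.mp hu with rfl | hu'
        · rw [hg] at hgu; cases hgu
        · exact ih3 h' ⟨u, hu', hgu⟩
    · have hstep : pvMinStep acc t = pvCombine acc g := by simp [pvMinStep, hg]
      rw [hstep]
      obtain ⟨q, hq, hqg, hqacc, hqor⟩ := pvCombine_spec acc g
      rw [hq]
      obtain ⟨ih1, ih2, ih3⟩ := ih (some q)
      refine ⟨?_, ?_, ?_⟩
      · rcases ih1 with h | ⟨h, hr, ⟨u, hu, hgu⟩⟩
        · rcases hqor with rfl | hacc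
          · exact Or.inr ⟨q, h, ⟨t, by simp, hg⟩⟩
          · exact Or.inl (h.trans hacc.symm)
        · exact Or.inr ⟨h, hr, ⟨u, List.mem_cons_of_mem _ hu, hgu⟩⟩
      · intro p hp
        obtain ⟨h, hr, hle⟩ := ih2 q rfl
        exact ⟨h, hr, le_trans hle (hqacc p hp)⟩
      · intro h' hocc
        obtain ⟨u, hu, hgu⟩ := hocc
        rcases List.mem_cons.mp hu with rfl | hu'
        · rw [hg] at hgu
          obtain ⟨h, hr, hle⟩ := ih2 q rfl
          cases hgu
          exact ⟨h, hr, le_trans hle hqg⟩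
        · exact ih3 h' ⟨u, hu', hgu⟩

-- the joint state invariant of A's normalize loop and B's single loop
def pvInv (A : List String × PySem.Set String) (B : PySem.Set String × Option (Int × String)) : Prop :=
  (∀ x, x ∈ A.2 ↔ x ∈ A.1) ∧
  (∀ x ∈ A.1, (pvSafeAltByTag.get? x).isSome) ∧
  (∀ x, (pvSafeAltByTag.get? x).isSome → (x ∈ B.1 ↔ x ∈ A.1)) ∧
  B.2 = pvMinFam A.1

lemma pvGet?_empty : pvSafeAltByTag.get? "" = none := by decide

set_option maxHeartbeats 1000000 in
lemma pvLoop_inv (items : List String) :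
    pvInv (items.foldl pvStepA ([], PySem.Set.empty))
          (items.foldl pvStepB (PySem.Set.empty, none)) := by
  induction items using List.reverseRecOn with
  | nil =>
    refine ⟨by simp [PySem.Set.empty], by simp, by simp [PySem.Set.empty], rfl⟩
  | append_singleton l x ih =>
    obtain ⟨inv1, inv4, inv2, inv3⟩ := ih
    simp only [List.foldl_append, List.foldl_cons, List.foldl_nil]
    set a := l.foldl pvStepA ([], PySem.Set.empty) with ha
    set b := l.foldl pvStepB (PySem.Set.empty, none) with hb
    simp only [pvStepA, pvStepB]
    set T := PySem.Dict.getD pvLegacyAliases (pvNormalizeText x) (pvNormalizeText x) with hT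
    clear_value a b T
    rcases hget : pvSafeAltByTag.get? T with _ | hit
    · -- T is not a valid tag: A skips it, B only records it as seen
      have hvT : PySem.Set.contains pvValidRiskTags T = false := by
        rw [pvValid_eq_isSome, hget]; rfl
      simp only [hvT, Bool.not_false, Bool.or_true, Bool.true_or, if_true]
      by_cases hbc : PySem.Set.contains b.1 T = true
      · rw [if_pos hbc]; exact ⟨inv1, inv4, inv2, inv3⟩
      · rw [if_neg hbc]
        show pvInv a (PySem.Set.add b.1 T, b.2)
        refine ⟨inv1, inv4, ?_, inv3⟩
        intro y hy
        rw [PySem.Set.mem_add]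
        constructor
        · rintro (hmem | rfl)
          · exact (inv2 y hy).mp hmem
          · rw [hget] at hy; cases hy
        · intro hmem; exact Or.inl ((inv2 y hy).mpr hmem)
    · -- T is a valid tag
      have hvT : PySem.Set.contains pvValidRiskTags T = true := by
        rw [pvValid_eq_isSome, hget]; rfl
      have hTne : (T == "") = false := by
        rw [beq_eq_false_iff_ne]
        intro e; rw [e, pvGet?_empty] at hget; cases hget
      by_cases hmem : T ∈ a.1
      · -- already collected: both loops skip
        have hsA : PySem.Set.contains a.2 T = true :=
          (PySem.Set.contains_iff _ _).mpr ((inv1 T).mpr hmem)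
        have hsB : PySem.Set.contains b.1 T = true :=
          (PySem.Set.contains_iff _ _).mpr ((inv2 T (by rw [hget]; rfl)).mpr hmem)
        simp only [hvT, hTne, hsA, Bool.not_true, Bool.or_false, Bool.false_or, if_true]
        rw [if_pos hsB]
        exact ⟨inv1, inv4, inv2, inv3⟩
      · -- fresh valid tag: A appends it, B merges its hit into the minimum
        have hsA : PySem.Set.contains a.2 T = false := by
          apply Bool.eq_false_iff.mpr
          intro hc; exact hmem ((inv1 T).mp ((PySem.Set.contains_iff _ _).mp hc))
        have hsB : PySem.Set.contains b.1 T = false := by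
          apply Bool.eq_false_iff.mpr
          intro hc; exact hmem ((inv2 T (by rw [hget]; rfl)).mp ((PySem.Set.contains_iff _ _).mp hc))
        simp only [hvT, hTne, hsA, Bool.not_true, Bool.or_false]
        by_cases hsp : PySem.Set.contains b.1 T = true
        · rw [hsB] at hsp; exact absurd hsp (by decide)
        · rw [if_neg hsp]
          show pvInv (a.1 ++ [T], PySem.Set.add a.2 T) (PySem.Set.add b.1 T, pvCombine b.2 hit)
          refine ⟨?_, ?_, ?_, ?_⟩
          · intro y
            rw [PySem.Set.mem_add, List.mem_append, List.mem_singleton, inv1]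
          · intro y hy
            rcases List.mem_append.mp hy with hy' | hy'
            · exact inv4 y hy'
            · rw [List.mem_singleton.mp hy', hget]; rfl
          · intro y hy
            rw [PySem.Set.mem_add, List.mem_append, List.mem_singleton, inv2 y hy]
          · show pvCombine b.2 hit = pvMinFam (a.1 ++ [T])
            rw [inv3]
            simp [pvMinFam, List.foldl_append, pvMinStep, hget]

-- the ordered family scan returns the message of the least inhabited family
lemma pvScan_spec (fams : List (PySem.Set String × String)) (ts : PySem.Set String) :
    ∀ j (hj : j < fams.length),
    (∃ t, t ∈ ts ∧ t ∈ (fams[j]'hj).1) →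
    (∀ i (hi : i < fams.length), i < j → ¬ ∃ t, t ∈ ts ∧ t ∈ (fams[i]'hi).1) →
    pvScanFamilies fams ts = (fams[j]'hj).2 := by
  induction fams with
  | nil => intro j hj; exact absurd hj (by simp)
  | cons p rest ih =>
    intro j hj hocc hnone
    obtain ⟨fam, msg⟩ := p
    cases j with
    | zero =>
      obtain ⟨t, ht, hf⟩ := hocc
      have hmem : t ∈ PySem.Set.inter fam ts := (PySem.Set.mem_inter _ _ _).mpr ⟨hf, ht⟩
      simp only [pvScanFamilies]
      rw [if_pos (List.ne_nil_of_mem hmem)]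
      rfl
    | succ j' =>
      have hhead : PySem.Set.inter fam ts = [] := by
        rw [List.eq_nil_iff_forall_not_mem]
        intro y hy
        obtain ⟨hyf, hyts⟩ := (PySem.Set.mem_inter _ _ _).mp hy
        exact hnone 0 (by simp) (Nat.succ_pos _) ⟨y, hyts, hyf⟩
      simp only [pvScanFamilies]
      rw [if_neg (by simp [hhead])]
      have hj' : j' < rest.length := by simpa using hj
      refine ih j' hj' (by simpa using hocc) ?_
      intro i hi hij
      have := hnone (i + 1) (by simpa using hi) (Nat.succ_lt_succ hij)
      simpa using this

lemma pvMain_eq (tags : Option (List String)) :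
    safer_alternative_for_risk_tags tags = safer_alternative_for_risk_tags_alt tags := by
  obtain ⟨inv1, inv4, inv2, inv3⟩ := pvLoop_inv (tags.getD [])
  simp only [safer_alternative_for_risk_tags, safer_alternative_for_risk_tags_alt,
    normalize_risk_tags]
  set a := (tags.getD []).foldl pvStepA ([], PySem.Set.empty) with ha
  set b := (tags.getD []).foldl pvStepB (PySem.Set.empty, none) with hb
  clear_value a b
  have hMF : pvMinFam a.1 = List.foldl pvMinStep none a.1 := rfl
  rw [inv3, hMF]
  by_cases hnil : a.1 = []
  · rw [hnil]
    simp [PySem.Set.ofList_nil]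
  · obtain ⟨t0, ht0⟩ := List.exists_mem_of_ne_nil a.1 hnil
    have hs0 : (pvSafeAltByTag.get? t0).isSome := inv4 t0 ht0
    obtain ⟨h0, hg0⟩ := Option.isSome_iff_exists.mp hs0
    obtain ⟨_, _, cl3⟩ := pvMinFam_aux a.1 none
    obtain ⟨h, hres, _⟩ := cl3 h0 ⟨t0, ht0, hg0⟩
    obtain ⟨cl1, _, _⟩ := pvMinFam_aux a.1 none
    have hocc : pvOccH a.1 h := by
      rcases cl1 with hnone | ⟨h2, hres2, hocc2⟩
      · rw [hres] at hnone; cases hnone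
      · rw [hres] at hres2
        cases hres2; exact hocc2
    have hmin : ∀ h', pvOccH a.1 h' → h.1 ≤ h'.1 := by
      intro h' hocc'
      obtain ⟨h2, hres2, hle2⟩ := cl3 h' hocc'
      rw [hres] at hres2
      cases hres2; exact hle2
    obtain ⟨t, htl, hgt⟩ := hocc
    obtain ⟨j, hj_eq, hjfam⟩ := pvGet?_cases t h hgt
    have hne : PySem.Set.ofList a.1 ≠ [] :=
      List.ne_nil_of_mem ((PySem.Set.mem_ofList _ _).mpr ht0)
    rw [if_neg hne, hres]
    have hjlen : j.1 < pvRiskFamilies.length := by rw [pvRiskFamilies_length]; exact j.2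
    rw [pvScan_spec pvRiskFamilies (PySem.Set.ofList a.1) j.1 hjlen
        ⟨t, (PySem.Set.mem_ofList _ _).mpr htl, by rw [pvFamAt_eq j hjlen]; exact hjfam⟩ ?_]
    · rw [pvFamAt_eq j hjlen, hj_eq]
    · intro i hi hij hex
      obtain ⟨y, hyts, hyf⟩ := hex
      have hi6 : i < 6 := by rw [pvRiskFamilies_length] at hi; exact hi
      have hyg : pvSafeAltByTag.get? y = some ((i : Int), (pvFamAt ⟨i, hi6⟩).2) :=
        pvFam_lookup ⟨i, hi6⟩ y (by rw [← pvFamAt_eq ⟨i, hi6⟩ hi]; exact hyf)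
      have hocci : pvOccH a.1 ((i : Int), (pvFamAt ⟨i, hi6⟩).2) :=
        ⟨y, (PySem.Set.mem_ofList _ _).mp hyts, hyg⟩
      have hle := hmin _ hocci
      rw [hj_eq] at hle
      have hle' : (j.1 : Int) ≤ (i : Int) := hle
      omega

-- ===== VERDICT (by name: the statement is the Claim_ definition above) =====
theorem safer_alternative_for_risk_tags_spec : Claim_equal_safer_alternative_for_risk_tags := by
  intro tags _
  unfold Spec_safer_alternative_for_risk_tags
  exact pvMain_eq tags
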